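-- pv_equiv track=rewrite | github.com/ayeeshi-poosarla/parallel_translation_alignment | distributed_computing/testingcombined.py | build_kmer_index
-- ===== SOURCE A (Python) =====
-- def build_kmer_index(reference: str, protein: str, k: int) -> dict:
--     kmer_map = {}
--     for i in range(len(reference) - k + 1):
--         kmer = reference[i:i + k]
--         match_positions = [
--             j for j in range(len(protein) - k + 1) if protein[j:j + k] == kmer
--         ]
--         if match_positions:
--             kmer_map[kmer] = match_positions
--     return kmer_map
-- ===== SOURCE B (Python) =====
-- def build_kmer_index(reference: str, protein: str, k: int) -> dict:
--     index = {}
--     for j in range(len(protein) - k + 1):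
--         index.setdefault(protein[j:j + k], []).append(j)
--     kmer_map = {}
--     for i in range(len(reference) - k + 1):
--         kmer = reference[i:i + k]
--         if kmer in index:
--             kmer_map[kmer] = index[kmer]
--     return kmer_map
-- ===== Notes on version B (the rewrite author's own statement) =====
-- stated objective: faster
-- what changed: B builds a protein k-mer -> positions dictionary in one pass over the protein and answers each reference k-mer by a single lookup, instead of A's full rescan of the protein for every reference position.
import Mathlib
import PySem

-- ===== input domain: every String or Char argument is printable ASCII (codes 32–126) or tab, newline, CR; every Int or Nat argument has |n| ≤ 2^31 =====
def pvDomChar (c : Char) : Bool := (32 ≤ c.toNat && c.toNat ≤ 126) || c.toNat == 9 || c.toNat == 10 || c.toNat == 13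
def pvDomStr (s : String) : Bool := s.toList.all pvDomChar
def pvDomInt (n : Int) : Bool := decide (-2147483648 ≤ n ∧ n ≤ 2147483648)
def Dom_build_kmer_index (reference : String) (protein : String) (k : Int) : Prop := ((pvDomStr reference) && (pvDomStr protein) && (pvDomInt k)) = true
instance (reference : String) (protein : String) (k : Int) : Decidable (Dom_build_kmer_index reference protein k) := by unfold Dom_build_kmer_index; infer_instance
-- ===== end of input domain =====

-- B replaces A's nested scan of the protein per reference k-mer with a protein
-- k-mer → positions index built in one pass, then one lookup per reference k-mer
-- (objective: faster).

-- ===== PORT A =====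
-- A: for each reference k-mer, scan the whole protein for matching positions.
def build_kmer_index (reference : String) (protein : String) (k : Int) : List (String × List Int) :=
  ((PySem.List.pyRange 0 (PySem.Str.len reference - k + 1) 1).foldl
    (fun kmer_map i =>
      let kmer := PySem.Str.slice reference (some i) (some (i + k))
      let match_positions :=
        (PySem.List.pyRange 0 (PySem.Str.len protein - k + 1) 1).filter
          (fun j => PySem.Str.slice protein (some j) (some (j + k)) == kmer)
      if match_positions ≠ [] then kmer_map.insert kmer match_positions else kmer_map)
    PySem.Dict.empty).items

-- ===== PORT B =====
-- B: one pass over the protein builds index : k-mer → positions, then one lookup per reference k-mer.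
def build_kmer_index_alt (reference : String) (protein : String) (k : Int) : List (String × List Int) :=
  let index : PySem.Dict String (List Int) :=
    (PySem.List.pyRange 0 (PySem.Str.len protein - k + 1) 1).foldl
      (fun d j => d.modify (PySem.Str.slice protein (some j) (some (j + k))) [] (· ++ [j]))
      PySem.Dict.empty
  ((PySem.List.pyRange 0 (PySem.Str.len reference - k + 1) 1).foldl
    (fun kmer_map i =>
      let kmer := PySem.Str.slice reference (some i) (some (i + k))
      match index.get? kmer with
      | some ps => kmer_map.insert kmer ps
      | none => kmer_map)
    PySem.Dict.empty).items

-- ===== PRECONDITION & SPEC =====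
def Spec_build_kmer_index (reference : String) (protein : String) (k : Int) (out : List (String × List Int)) : Prop := out = build_kmer_index_alt reference protein k
instance (reference : String) (protein : String) (k : Int) (out : List (String × List Int)) : Decidable (Spec_build_kmer_index reference protein k out) := by unfold Spec_build_kmer_index; infer_instance

-- ===== CLAIM (what is proved, stated in full; the proofs are below) =====
def Claim_equal_build_kmer_index : Prop := ∀ (reference : String) (protein : String) (k : Int), Dom_build_kmer_index reference protein k → Spec_build_kmer_index reference protein k (build_kmer_index reference protein k)

-- ===== LEMMAS AND PROOFS =====

-- The protein index's lookup at km is exactly A's matching-position filter for km.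
theorem index_getD (protein : String) (k : Int) (km : String) :
    ((PySem.List.pyRange 0 (PySem.Str.len protein - k + 1) 1).foldl
      (fun d j => d.modify (PySem.Str.slice protein (some j) (some (j + k))) [] (· ++ [j]))
      PySem.Dict.empty).getD km []
    = (PySem.List.pyRange 0 (PySem.Str.len protein - k + 1) 1).filter
        (fun j => PySem.Str.slice protein (some j) (some (j + k)) == km) := by
  have h := PySem.Dict.getD_foldl_modify_append
    ((PySem.List.pyRange 0 (PySem.Str.len protein - k + 1) 1).map
      (fun j => (PySem.Str.slice protein (some j) (some (j + k)), j)))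
    (PySem.Dict.empty (κ := String) (ν := List Int)) km
  rw [List.foldl_map, List.filter_map, List.map_map] at h
  simpa [Function.comp_def] using h

-- The index has a key exactly when some protein position matches.
theorem index_get?_none_iff (protein : String) (k : Int) (km : String) :
    (((PySem.List.pyRange 0 (PySem.Str.len protein - k + 1) 1).foldl
      (fun d j => d.modify (PySem.Str.slice protein (some j) (some (j + k))) [] (· ++ [j]))
      PySem.Dict.empty).get? km = none)
    ↔ (PySem.List.pyRange 0 (PySem.Str.len protein - k + 1) 1).filter
        (fun j => PySem.Str.slice protein (some j) (some (j + k)) == km) = [] := by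
  rw [PySem.Dict.get?_eq_none_iff_not_mem_keys,
      PySem.Dict.keys_foldl_modify_key _ _ _ (fun d x v => v ++ [x])]
  simp only [PySem.Dict.keys_empty]
  rw [show PySem.Set.update ([] : List String) ((PySem.List.pyRange 0 (PySem.Str.len protein - k + 1) 1).map (fun j => PySem.Str.slice protein (some j) (some (j + k)))) = PySem.Set.ofList ((PySem.List.pyRange 0 (PySem.Str.len protein - k + 1) 1).map (fun j => PySem.Str.slice protein (some j) (some (j + k)))) from rfl]
  rw [PySem.Set.mem_ofList]
  simp only [List.mem_map, not_exists, not_and, List.filter_eq_nil_iff, beq_iff_eq]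

theorem build_kmer_index_spec : Claim_equal_build_kmer_index := by
  intro reference protein k _
  unfold Spec_build_kmer_index build_kmer_index build_kmer_index_alt
  simp only []
  congr 1
  apply PySem.List.foldl_congr_mem
  intro acc i _
  set km := PySem.Str.slice reference (some i) (some (i + k)) with hkm
  set idx := (PySem.List.pyRange 0 (PySem.Str.len protein - k + 1) 1).foldl
      (fun d j => d.modify (PySem.Str.slice protein (some j) (some (j + k))) [] (· ++ [j]))
      PySem.Dict.empty with hidx
  by_cases hmp : (PySem.List.pyRange 0 (PySem.Str.len protein - k + 1) 1).filter
      (fun j => PySem.Str.slice protein (some j) (some (j + k)) == km) = []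
  · have hn : idx.get? km = none := (index_get?_none_iff protein k km).mpr hmp
    rw [hn, hmp]
    simp
  · have hs : idx.get? km ≠ none := fun h => hmp ((index_get?_none_iff protein k km).mp h)
    obtain ⟨ps, hps⟩ := Option.ne_none_iff_exists'.mp hs
    have hval : ps = (PySem.List.pyRange 0 (PySem.Str.len protein - k + 1) 1).filter
        (fun j => PySem.Str.slice protein (some j) (some (j + k)) == km) := by
      rw [← index_getD protein k km, ← hidx, PySem.Dict.getD_eq_get?_getD, hps]; rfl
    rw [hps, if_pos hmp, ← hval]
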